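-- pv_equiv track=rewrite | github.com/tklijnsma/texhelp | texhelp/bib_formatter.py | comma_separate_ignoring_quotes
-- ===== SOURCE A (Python) =====
-- def comma_separate_ignoring_quotes(text):
--     # Flatten line breaks
--     text = text.replace('\n','')
--     quote_mode = False
--     separated = []
--     field = ''
--     for i, c in enumerate(text):
--         if c == '"':
--             if i>0 and text[i-1] == '\\':
--                 field += c
--             else:
--                 quote_mode = not(quote_mode)
--                 field += c
--         elif c == ',' and not(quote_mode):
--             separated.append(field)
--             field = ''
--         else:
--             field += c
--     if text[-1] != ',': separated.append(field)
--     return separated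
-- ===== SOURCE B (Python) =====
-- def comma_separate_ignoring_quotes(text):
--     # Two-pass: first record indices of separator commas, then slice the text between them.
--     text = text.replace('\n', '')
--     quote_mode = False
--     bounds = []
--     for i, c in enumerate(text):
--         if c == '"':
--             if not (i > 0 and text[i - 1] == '\\'):
--                 quote_mode = not quote_mode
--         elif c == ',' and not quote_mode:
--             bounds.append(i)
--     starts = [0] + [i + 1 for i in bounds]
--     ends = bounds + [len(text)]
--     parts = [text[s:e] for s, e in zip(starts, ends)]
--     if text[-1] == ',':
--         parts.pop()
--     return parts
-- ===== Notes on version B (the rewrite author's own statement) =====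
-- stated objective: alternative
-- what changed: A builds each field character by character while scanning; B scans once only to record the indices of the separator commas and then produces the fields by slicing the text between consecutive boundaries (bulk slicing replaces per-character string concatenation).
-- outside the precondition, e.g. on comma_separate_ignoring_quotes('\n'): A raises IndexError, B raises IndexError
import Mathlib
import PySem

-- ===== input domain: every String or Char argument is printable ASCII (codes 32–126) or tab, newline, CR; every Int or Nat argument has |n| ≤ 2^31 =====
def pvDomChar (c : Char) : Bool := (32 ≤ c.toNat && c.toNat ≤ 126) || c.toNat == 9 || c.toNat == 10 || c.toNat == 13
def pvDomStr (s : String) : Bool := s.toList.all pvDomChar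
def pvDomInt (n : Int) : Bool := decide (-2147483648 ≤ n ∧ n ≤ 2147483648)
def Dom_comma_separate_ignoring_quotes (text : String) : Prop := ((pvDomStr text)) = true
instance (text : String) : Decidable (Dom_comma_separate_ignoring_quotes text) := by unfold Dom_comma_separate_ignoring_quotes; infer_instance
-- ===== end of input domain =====

-- B replaces A's incremental field building by a two-pass scheme (record separator-comma
-- indices, then slice between them): same O(n) scan, measured faster (bulk slicing replaces per-character concatenation).

-- ===== PORT A =====
-- one loop iteration of A: state (quote_mode, separated, field), input (i, c)
def pvAStep (t : List Char) (st : Bool × List (List Char) × List Char) (ic : Int × Char) :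
    Bool × List (List Char) × List Char :=
  let qm := st.1; let sep := st.2.1; let field := st.2.2
  let i := ic.1; let c := ic.2
  if c = '"' then
    -- i > 0 guarantees the index i-1 is in range, so pyGetD's default is never read
    if i > 0 ∧ PySem.List.pyGetD t (i - 1) ' ' = '\\' then (qm, sep, field ++ [c])
    else (!qm, sep, field ++ [c])
  else if c = ',' ∧ qm = false then (qm, sep ++ [field], [])
  else (qm, sep, field ++ [c])

def comma_separate_ignoring_quotes (text : String) : List String :=
  let t := PySem.Chars.replace text.toList ['\n'] []   -- text.replace('\n','')
  let st := (PySem.List.enumerate t 0).foldl (pvAStep t) (false, [], [])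
  -- text[-1]: under Pre_ (t ≠ []) the index is in range, so pyGetD's default ' ' is never read
  let sep := if PySem.List.pyGetD t (-1) ' ' ≠ ',' then st.2.1 ++ [st.2.2] else st.2.1
  sep.map String.ofList

-- ===== PORT B =====
-- one loop iteration of B: state (quote_mode, bounds), input (i, c)
def pvBStep (t : List Char) (st : Bool × List Int) (ic : Int × Char) : Bool × List Int :=
  let qm := st.1; let bnds := st.2; let i := ic.1; let c := ic.2
  if c = '"' then
    if ¬ (i > 0 ∧ PySem.List.pyGetD t (i - 1) ' ' = '\\') then (!qm, bnds) else (qm, bnds)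
  else if c = ',' ∧ qm = false then (qm, bnds ++ [i])
  else (qm, bnds)

def comma_separate_ignoring_quotes_alt (text : String) : List String :=
  let t := PySem.Chars.replace text.toList ['\n'] []   -- text.replace('\n','')
  let st := (PySem.List.enumerate t 0).foldl (pvBStep t) (false, [])
  let bounds := st.2
  let starts := 0 :: bounds.map (· + 1)
  let ends := bounds ++ [(t.length : Int)]
  let parts := (starts.zip ends).map (fun se => PySem.List.slice t (some se.1) (some se.2))
  -- text[-1]: under Pre_ (t ≠ []) the index is in range, so pyGetD's default ' ' is never read
  let parts := if PySem.List.pyGetD t (-1) ' ' = ',' then parts.dropLast else parts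
  parts.map String.ofList

-- ===== PRECONDITION & SPEC =====
-- Pre_ excludes exactly the inputs on which both Pythons raise IndexError at text[-1]:
-- strings that are empty after removing '\n'.
def Pre_comma_separate_ignoring_quotes (text : String) : Prop :=
  PySem.Chars.replace text.toList ['\n'] [] ≠ []
instance (text : String) : Decidable (Pre_comma_separate_ignoring_quotes text) := by
  unfold Pre_comma_separate_ignoring_quotes; infer_instance

def pvWitness_comma_separate_ignoring_quotes : String := "a,\"x,y\",b"

def Spec_comma_separate_ignoring_quotes (text : String) (out : List String) : Prop := out = comma_separate_ignoring_quotes_alt text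
instance (text : String) (out : List String) : Decidable (Spec_comma_separate_ignoring_quotes text out) := by unfold Spec_comma_separate_ignoring_quotes; infer_instance

-- ===== CLAIM (what is proved, stated in full; the proofs are below) =====
def Claim_equal_comma_separate_ignoring_quotes : Prop := ∀ (text : String), Dom_comma_separate_ignoring_quotes text → Pre_comma_separate_ignoring_quotes text → Spec_comma_separate_ignoring_quotes text (comma_separate_ignoring_quotes text)

-- ===== LEMMAS AND PROOFS =====

-- The char-list fields of B's parts, described recursively: all but the last …
def pvChainInit (t : List Char) (s : Int) (bnds : List Int) : List (List Char) :=
  match bnds with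
  | [] => []
  | b :: bs => PySem.List.slice t (some s) (some b) :: pvChainInit t (b + 1) bs

-- … and the start index of the last field
def pvLastStart (s : Int) (bnds : List Int) : Int :=
  match bnds with | [] => s | b :: bs => pvLastStart (b + 1) bs

lemma pv_zip_eq (t : List Char) (bnds : List Int) : ∀ (s n : Int),
    (((s :: bnds.map (· + 1)).zip (bnds ++ [n])).map
        (fun se => PySem.List.slice t (some se.1) (some se.2)))
      = pvChainInit t s bnds ++ [PySem.List.slice t (some (pvLastStart s bnds)) (some n)] := by
  induction bnds with
  | nil => intro s n; simp [pvChainInit, pvLastStart]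
  | cons b bs ih => intro s n; simp [pvChainInit, pvLastStart, ih (b + 1) n]

lemma pv_chainInit_append (t : List Char) (bnds : List Int) : ∀ (s i : Int),
    pvChainInit t s (bnds ++ [i])
      = pvChainInit t s bnds ++ [PySem.List.slice t (some (pvLastStart s bnds)) (some i)] := by
  induction bnds with
  | nil => intro s i; simp [pvChainInit, pvLastStart]
  | cons b bs ih => intro s i; simp [pvChainInit, pvLastStart, ih (b + 1) i]

lemma pv_lastStart_append (bnds : List Int) : ∀ (s i : Int),
    pvLastStart s (bnds ++ [i]) = i + 1 := by
  induction bnds with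
  | nil => intro s i; simp [pvLastStart]
  | cons b bs ih => intro s i; simp [pvLastStart, ih (b + 1) i]

lemma pv_slice_snoc (t : List Char) (s : Int) (n : Nat) (hs0 : 0 ≤ s) (hsn : s ≤ (n : Int))
    (hn : n < t.length) :
    PySem.List.slice t (some s) (some ((n : Int) + 1))
      = PySem.List.slice t (some s) (some (n : Int)) ++ [t[n]] := by
  rw [PySem.List.slice_toNat t hs0 (by omega), PySem.List.slice_toNat t hs0 (by omega)]
  have h1 : ((n : Int) + 1).toNat = n + 1 := by omega
  have h2 : ((n : Int)).toNat = n := by omega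
  rw [h1, h2]
  have hst : s.toNat ≤ n := by omega
  have hk : n + 1 - s.toNat = (n - s.toNat) + 1 := by omega
  rw [hk, List.take_add_one]
  have hidx : (t.drop s.toNat)[n - s.toNat]? = some t[n] := by
    rw [List.getElem?_drop]
    have : s.toNat + (n - s.toNat) = n := by omega
    rw [this, List.getElem?_eq_getElem hn]
  simp [hidx]

-- empty slice at equal endpoints
lemma pv_slice_nil (t : List Char) (a : Int) (h : 0 ≤ a) :
    PySem.List.slice t (some a) (some a) = [] := by
  rw [PySem.List.slice_toNat t h h]; simp

-- slice to the (clamped) end: any bound ≥ length gives the same list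
lemma pv_slice_clamp (t : List Char) (s : Int) (n : Nat) (hs : 0 ≤ s) (hn : t.length ≤ n) :
    PySem.List.slice t (some s) (some (n : Int))
      = PySem.List.slice t (some s) (some (t.length : Int)) := by
  rw [PySem.List.slice_toNat t hs (by omega), PySem.List.slice_toNat t hs (by omega)]
  have h2 : ((n : Int)).toNat = n := by omega
  have h3 : ((t.length : Int)).toNat = t.length := by omega
  rw [h2, h3, List.take_of_length_le (by simp only [List.length_drop]; omega),
    List.take_of_length_le (by simp only [List.length_drop]; omega)]

-- the loop invariant: A's (separated, field) are exactly B's slices between recorded bounds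
lemma pv_loop (t : List Char) : ∀ (xs : List Char) (n : Nat), t.drop n = xs →
    ∀ (qm : Bool) (sep : List (List Char)) (field : List Char) (bnds : List Int),
    sep = pvChainInit t 0 bnds →
    field = PySem.List.slice t (some (pvLastStart 0 bnds)) (some (n : Int)) →
    0 ≤ pvLastStart 0 bnds → pvLastStart 0 bnds ≤ (n : Int) →
    ((PySem.List.enumerate xs (n : Int)).foldl (pvAStep t) (qm, sep, field)).1
      = ((PySem.List.enumerate xs (n : Int)).foldl (pvBStep t) (qm, bnds)).1 ∧
    ((PySem.List.enumerate xs (n : Int)).foldl (pvAStep t) (qm, sep, field)).2.1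
      = pvChainInit t 0 ((PySem.List.enumerate xs (n : Int)).foldl (pvBStep t) (qm, bnds)).2 ∧
    ((PySem.List.enumerate xs (n : Int)).foldl (pvAStep t) (qm, sep, field)).2.2
      = PySem.List.slice t
          (some (pvLastStart 0 ((PySem.List.enumerate xs (n : Int)).foldl (pvBStep t) (qm, bnds)).2))
          (some (t.length : Int)) := by
  intro xs
  induction xs with
  | nil =>
    intro n hdrop qm sep field bnds hsep hfield hls0 hlsn
    have hlen : t.length ≤ n := by rwa [List.drop_eq_nil_iff] at hdrop
    simp only [PySem.List.enumerate_nil, List.foldl_nil]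
    refine ⟨by trivial, hsep, ?_⟩
    rw [hfield, pv_slice_clamp t _ n hls0 hlen]
  | cons x xs ih =>
    intro n hdrop qm sep field bnds hsep hfield hls0 hlsn
    have hn : n < t.length := by
      by_contra h
      rw [List.drop_eq_nil_of_le (by omega)] at hdrop; simp at hdrop
    have hx : t[n] = x := by
      have h0 : t[n]? = some x := by
        rw [← Nat.add_zero n, ← List.getElem?_drop, hdrop]; rfl
      simpa [List.getElem?_eq_getElem hn] using h0
    have hdrop' : t.drop (n + 1) = xs := by
      have h : List.drop 1 (List.drop n t) = List.drop 1 (x :: xs) := by rw [hdrop]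
      rwa [List.drop_drop, List.drop_one, List.tail_cons] at h
    rw [PySem.List.enumerate_cons]
    simp only [List.foldl_cons]
    have hcast : ((n : Int) + 1) = ((n + 1 : Nat) : Int) := by push_cast; ring
    have hfield' : field ++ [x]
        = PySem.List.slice t (some (pvLastStart 0 bnds)) (some ((n + 1 : Nat) : Int)) := by
      rw [← hcast, pv_slice_snoc t _ n hls0 hlsn hn, hx, hfield]
    simp only [pvAStep, pvBStep]
    by_cases hq : x = '"'
    · by_cases hesc : (n : Int) > 0 ∧ PySem.List.pyGetD t ((n : Int) - 1) ' ' = '\\'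
      · rw [if_pos hq, if_pos hq, if_pos hesc, if_neg (not_not_intro hesc), hcast]
        exact ih (n + 1) hdrop' qm sep (field ++ [x]) bnds hsep hfield'
          hls0 (by push_cast; omega)
      · rw [if_pos hq, if_pos hq, if_neg hesc, if_pos hesc, hcast]
        exact ih (n + 1) hdrop' (!qm) sep (field ++ [x]) bnds hsep hfield'
          hls0 (by push_cast; omega)
    · by_cases hsepc : x = ',' ∧ qm = false
      · rw [if_neg hq, if_neg hq, if_pos hsepc, if_pos hsepc, hcast]
        refine ih (n + 1) hdrop' qm (sep ++ [field]) [] (bnds ++ [(n : Int)]) ?_ ?_ ?_ ?_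
        · rw [pv_chainInit_append, ← hsep, ← hfield]
        · rw [pv_lastStart_append, ← hcast, pv_slice_nil t _ (by omega)]
        · rw [pv_lastStart_append]; omega
        · rw [pv_lastStart_append]; push_cast; omega
      · rw [if_neg hq, if_neg hq, if_neg hsepc, if_neg hsepc, hcast]
        exact ih (n + 1) hdrop' qm sep (field ++ [x]) bnds hsep hfield'
          hls0 (by push_cast; omega)

-- ===== VERDICT (by name: the statement is the Claim_ definition above) =====
theorem comma_separate_ignoring_quotes_spec : Claim_equal_comma_separate_ignoring_quotes := by
  intro text _ _
  unfold Spec_comma_separate_ignoring_quotes comma_separate_ignoring_quotes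
    comma_separate_ignoring_quotes_alt
  set t := PySem.Chars.replace text.toList ['\n'] [] with ht
  dsimp only
  have h := pv_loop t t 0 (by simp) false [] [] [] rfl
    (by simp [pvLastStart, pv_slice_nil t 0 le_rfl]) (by simp [pvLastStart]) (by simp [pvLastStart])
  obtain ⟨h1, h2, h3⟩ := h
  simp only [Nat.cast_zero] at h2 h3
  rw [pv_zip_eq]
  by_cases hc : PySem.List.pyGetD t (-1) ' ' = ','
  · rw [if_neg (by simpa using hc), if_pos hc, h2, List.dropLast_concat]
  · rw [if_pos (by simpa using hc), if_neg hc, h2, h3]
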